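-- pv_equiv track=rewrite | github.com/chokandzhunusov/coding-problems | Arrays/min_reward.py | min_reward
-- ===== SOURCE A (Python) =====
-- def min_reward(scores: 'list[int]') -> 'int':
--     rewards = [1 for _ in scores]
--     for i in range(1, len(scores)):
--         if scores[i] > scores[i-1]:
--             rewards[i] = rewards[i-1] + 1
--     for j in reversed(range(len(scores) - 1)):
--         if scores[j] > scores[j+1]:
--             rewards[j] = max(rewards[j], rewards[j+1] + 1)
--     return sum(rewards)
-- ===== SOURCE B (Python) =====
-- def min_reward(scores: 'list[int]') -> 'int':
--     # One pass, O(1) extra space: count rising/falling run lengths instead of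
--     # building a rewards array.
--     if not scores:
--         return 0
--     total = 1
--     up = down = peak = 0
--     for i in range(1, len(scores)):
--         if scores[i] > scores[i - 1]:
--             up += 1
--             down = 0
--             peak = up
--             total += up + 1
--         elif scores[i] < scores[i - 1]:
--             down += 1
--             up = 0
--             total += down + (1 if down > peak else 0)
--         else:
--             up = down = peak = 0
--             total += 1
--     return total
-- ===== Notes on version B (the rewrite author's own statement) =====
-- stated objective: faster
-- what changed: A builds a rewards array and makes a forward pass plus a backward pass over it; B makes a single forward pass with O(1) extra state, counting rising/falling run lengths (up, down, last peak) and adding each element's reward on the fly.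
import Mathlib
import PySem

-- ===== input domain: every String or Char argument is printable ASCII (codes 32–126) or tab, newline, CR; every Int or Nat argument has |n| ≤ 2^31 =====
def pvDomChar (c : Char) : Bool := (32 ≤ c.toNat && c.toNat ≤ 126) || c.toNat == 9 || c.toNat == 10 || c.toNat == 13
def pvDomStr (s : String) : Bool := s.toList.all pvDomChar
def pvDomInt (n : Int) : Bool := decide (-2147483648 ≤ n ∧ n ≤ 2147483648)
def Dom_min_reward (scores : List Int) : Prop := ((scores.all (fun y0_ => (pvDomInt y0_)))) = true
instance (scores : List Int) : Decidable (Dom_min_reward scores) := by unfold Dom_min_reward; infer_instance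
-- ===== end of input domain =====

-- B replaces A's two passes over a rewards array by a single O(1)-space pass
-- counting rising/falling run lengths (objective: alternative algorithm).

-- ===== PORT A =====
-- step of A's forward loop: rewards[i] = rewards[i-1] + 1 when scores[i] > scores[i-1]
def stepF (s : List Int) (r : List Int) (i : Int) : List Int :=
  if PySem.List.pyGetD s i 0 > PySem.List.pyGetD s (i - 1) 0 then
    PySem.List.pySetD r i (PySem.List.pyGetD r (i - 1) 0 + 1)
  else r

-- step of A's backward loop: rewards[j] = max(rewards[j], rewards[j+1] + 1) when scores[j] > scores[j+1]
def stepB (s : List Int) (r : List Int) (j : Int) : List Int :=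
  if PySem.List.pyGetD s j 0 > PySem.List.pyGetD s (j + 1) 0 then
    PySem.List.pySetD r j (max (PySem.List.pyGetD r j 0) (PySem.List.pyGetD r (j + 1) 0 + 1))
  else r

def min_reward (scores : List Int) : Int :=
  let rewards := scores.map (fun _ => (1 : Int))
  let rewards := (PySem.List.pyRange 1 (PySem.List.len scores) 1).foldl (stepF scores) rewards
  let rewards := ((PySem.List.pyRange 0 (PySem.List.len scores - 1) 1).reverse).foldl (stepB scores) rewards
  rewards.sum

-- ===== PORT B =====
-- one step of B's loop on state (total, up, down, peak)
def stepAlt (s : List Int) (st : Int × Int × Int × Int) (i : Int) : Int × Int × Int × Int :=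
  let total := st.1; let up := st.2.1; let down := st.2.2.1; let peak := st.2.2.2
  if PySem.List.pyGetD s i 0 > PySem.List.pyGetD s (i - 1) 0 then
    (total + ((up + 1) + 1), up + 1, 0, up + 1)
  else if PySem.List.pyGetD s i 0 < PySem.List.pyGetD s (i - 1) 0 then
    (total + ((down + 1) + (if down + 1 > peak then 1 else 0)), 0, down + 1, peak)
  else
    (total + 1, 0, 0, 0)

def min_reward_alt (scores : List Int) : Int :=
  if scores = [] then 0
  else
    ((PySem.List.pyRange 1 (PySem.List.len scores) 1).foldl (stepAlt scores) (1, 0, 0, 0)).1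

-- ===== PRECONDITION & SPEC =====
def Spec_min_reward (scores : List Int) (out : Int) : Prop := out = min_reward_alt scores
instance (scores : List Int) (out : Int) : Decidable (Spec_min_reward scores out) := by unfold Spec_min_reward; infer_instance

-- ===== CLAIM (what is proved, stated in full; the proofs are below) =====
def Claim_equal_min_reward : Prop := ∀ (scores : List Int), Dom_min_reward scores → Spec_min_reward scores (min_reward scores)

-- ===== LEMMAS AND PROOFS =====

-- length of the strictly increasing run of scores ending at index k (as a reward value, ≥ 1)
def ufun (s : List Int) : Nat → Int
  | 0 => 1
  | k + 1 => if s.getD (k + 1) 0 > s.getD k 0 then ufun s k + 1 else 1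

-- number of strictly descending edges of scores ending at index k
def dnfun (s : List Int) : Nat → Nat
  | 0 => 0
  | k + 1 => if s.getD k 0 > s.getD (k + 1) 0 then dnfun s k + 1 else 0

-- length of the strictly decreasing run of scores starting at index i (a reward value, ≥ 1)
def dfun (s : List Int) (i : Nat) : Int :=
  if h : i + 1 < s.length ∧ s.getD i 0 > s.getD (i + 1) 0 then dfun s (i + 1) + 1 else 1
termination_by s.length - i
decreasing_by omega

-- value of A's rewards array at index j after the backward pass
def rfun (s : List Int) (j : Nat) : Int :=
  if h : j + 1 < s.length ∧ s.getD j 0 > s.getD (j + 1) 0 then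
    max (ufun s j) (rfun s (j + 1) + 1) else ufun s j
termination_by s.length - j
decreasing_by omega

-- triangular number c + (c-1) + ... + 1, written as the tail-descent sum it stands for
def tri (c : Nat) : Int := ((List.range c).map (fun (j : Nat) => (c : Int) - (j : Int))).sum

-- sum of the first m final rewards
def F (s : List Int) (m : Nat) : Int := ((List.range m).map (fun i => max (ufun s i) (dfun s i))).sum

-- B's abstract state after processing pairs up to index k
def totFun (s : List Int) (k : Nat) : Int :=
  F s (k - dnfun s k) + max (ufun s (k - dnfun s k)) ((dnfun s k : Int) + 1) + tri (dnfun s k)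

lemma ufun_pos (s : List Int) (k : Nat) : 1 ≤ ufun s k := by
  cases k with
  | zero => simp [ufun]
  | succ t =>
    simp only [ufun]
    split
    · have := ufun_pos s t; omega
    · omega

lemma dfun_pos (s : List Int) (i : Nat) : 1 ≤ dfun s i := by
  rw [dfun]
  split
  · have := dfun_pos s (i + 1); omega
  · omega
termination_by s.length - i
decreasing_by omega

lemma dnfun_le (s : List Int) (k : Nat) : dnfun s k ≤ k := by
  induction k with
  | zero => simp [dnfun]
  | succ t ih => simp only [dnfun]; split <;> omega

lemma dfun_one_of_stop (s : List Int) (k : Nat)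
    (h : ¬ (k + 1 < s.length ∧ s.getD k 0 > s.getD (k + 1) 0)) : dfun s k = 1 := by
  rw [dfun, dif_neg h]

lemma dnfun_edge (s : List Int) : ∀ j k, j < dnfun s k →
    j + 1 ≤ k ∧ s.getD (k - j - 1) 0 > s.getD (k - j) 0 := by
  intro j
  induction j with
  | zero =>
    intro k h
    cases k with
    | zero => simp [dnfun] at h
    | succ t =>
      simp only [dnfun] at h
      split at h
      · simpa using And.intro (Nat.succ_le_succ (Nat.zero_le t)) (by simpa using ‹_›)
      · omega
  | succ j ih =>
    intro k h
    cases k with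
    | zero => simp [dnfun] at h
    | succ t =>
      simp only [dnfun] at h
      split at h
      · have h2 : j < dnfun s t := by omega
        have := ih t h2
        constructor
        · omega
        · have e1 : t + 1 - (j + 1) - 1 = t - j - 1 := by omega
          have e2 : t + 1 - (j + 1) = t - j := by omega
          rw [e1, e2]; exact this.2
      · omega

lemma ufun_one_of_desc (s : List Int) (j k : Nat) (h : j < dnfun s k) :
    ufun s (k - j) = 1 := by
  obtain ⟨hjk, hgt⟩ := dnfun_edge s j k h
  obtain ⟨t, ht⟩ : ∃ t, k - j = t + 1 := ⟨k - j - 1, by omega⟩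
  have : ¬ (s.getD (t + 1) 0 > s.getD t 0) := by
    rw [show t = k - j - 1 from by omega, show k - j - 1 + 1 = k - j from by omega]
    omega
  rw [ht]
  simp only [ufun]
  rw [if_neg this]

lemma dfun_chain (s : List Int) (k : Nat) (hk : k < s.length) (hd : dfun s k = 1) :
    ∀ j, j ≤ dnfun s k → dfun s (k - j) = (j : Int) + 1 := by
  intro j
  induction j with
  | zero => simpa using hd
  | succ j ih =>
    intro h
    obtain ⟨hjk, hgt⟩ := dnfun_edge s j k (by omega)
    have e : k - (j + 1) + 1 = k - j := by omega
    rw [dfun]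
    have hcond : k - (j + 1) + 1 < s.length ∧ s.getD (k - (j + 1)) 0 > s.getD (k - (j + 1) + 1) 0 := by
      constructor
      · omega
      · rw [e]
        have e2 : k - (j + 1) = k - j - 1 := by omega
        rw [e2]; exact hgt
    rw [dif_pos hcond, e, ih (by omega)]
    push_cast; ring

lemma tri_zero : tri 0 = 0 := by simp [tri]

lemma tri_succ (c : Nat) : tri (c + 1) = tri c + ((c : Int) + 1) := by
  unfold tri
  rw [List.range_succ, List.map_append, List.sum_append]
  rw [show (fun (j : Nat) => (((c + 1 : Nat)) : Int) - (j : Int)) = (fun (j : Nat) => ((c : Int) - (j : Int)) + 1) from by funext j; push_cast; ring,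
    PySem.List.sum_map_add_int, PySem.List.sum_map_const_int]
  simp only [List.map_cons, List.map_nil, List.sum_cons, List.sum_nil]
  rw [List.length_range]
  ring

-- the settled tail: when the descent ending at k has just stopped, the sum of
-- final rewards up to k equals B's closed-form total
lemma F_succ_eq (s : List Int) (k : Nat) (hk : k < s.length) (hd : dfun s k = 1) :
    F s (k + 1) = totFun s k := by
  have hck : dnfun s k ≤ k := dnfun_le s k
  unfold totFun F
  rw [add_assoc, show k + 1 = (k - dnfun s k) + (dnfun s k + 1) from by omega,
    List.range_add, List.map_append, List.sum_append]
  congr 1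
  set c := dnfun s k with hc
  rw [List.range_succ_eq_map]
  simp only [List.map_cons, List.map_map, List.sum_cons, Function.comp_def, Nat.add_zero]
  rw [dfun_chain s k hk hd c (le_refl c)]
  congr 1
  unfold tri
  refine congrArg List.sum (List.map_congr_left ?_)
  intro j hj
  have hjc : j < c := List.mem_range.mp hj
  have e : k - c + Nat.succ j = k - (c - j - 1) := by omega
  rw [e, ufun_one_of_desc s (c - j - 1) k (by omega), dfun_chain s k hk hd (c - j - 1) (by omega)]
  have e2 : ((c - j - 1 : Nat) : Int) = (c : Int) - (j : Int) - 1 := by omega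
  rw [e2]
  omega

lemma rfun_eq_max (s : List Int) (j : Nat) : rfun s j = max (ufun s j) (dfun s j) := by
  by_cases h : j + 1 < s.length ∧ s.getD j 0 > s.getD (j + 1) 0
  · rw [rfun, dif_pos h, dfun, dif_pos h, rfun_eq_max s (j + 1)]
    have hu1 : ufun s (j + 1) = 1 := by
      simp only [ufun]; rw [if_neg (by omega)]
    rw [hu1]
    have hd := dfun_pos s (j + 1)
    omega
  · rw [rfun, dif_neg h, dfun_one_of_stop s j h]
    have := ufun_pos s j
    omega
termination_by s.length - j
decreasing_by omega

lemma sum_eq_range_getD (l : List Int) :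
    l.sum = ((List.range l.length).map (fun i => l.getD i 0)).sum := by
  induction l with
  | nil => simp
  | cons a t ih => simp [List.range_succ_eq_map, List.map_map, Function.comp_def, ih]

-- A's forward pass builds the ufun values
lemma fwd_inv (s : List Int) (k : Nat) (hk : k ≤ s.length) :
    ((PySem.List.pyRange 1 (k : Int) 1).foldl (stepF s) (s.map (fun _ => (1 : Int)))).length = s.length ∧
    ∀ i, i < s.length →
      ((PySem.List.pyRange 1 (k : Int) 1).foldl (stepF s) (s.map (fun _ => (1 : Int)))).getD i 0
        = if i < k then ufun s i else 1 := by
  induction k with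
  | zero =>
    rw [show ((0 : Nat) : Int) = 0 from rfl, PySem.List.pyRange_one_eq_nil (by norm_num)]
    simp only [List.foldl_nil]
    refine ⟨by simp, ?_⟩
    intro i hi
    rw [if_neg (by omega)]
    simp [List.getD, hi]
  | succ t ih =>
    by_cases h0 : t = 0
    · subst h0
      rw [show ((1 : Nat) : Int) = 1 from rfl, PySem.List.pyRange_one_eq_nil (by norm_num)]
      simp only [List.foldl_nil]
      refine ⟨by simp, ?_⟩
      intro i hi
      have he : (if i < 1 then ufun s i else 1) = 1 := by
        split
        · have : i = 0 := by omega
          subst this; simp [ufun]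
        · rfl
      rw [he]
      simp [List.getD, hi]
    · obtain ⟨ihl, ihg⟩ := ih (by omega)
      rw [show ((t + 1 : Nat) : Int) = (t : Int) + 1 from by push_cast; ring,
        PySem.List.pyRange_one_succ_right (by omega : (1 : Int) ≤ (t : Int)),
        List.foldl_append, List.foldl_cons, List.foldl_nil]
      set L := (PySem.List.pyRange 1 (t : Int) 1).foldl (stepF s) (s.map (fun _ => (1 : Int))) with hL
      unfold stepF
      rw [show (t : Int) - 1 = ((t - 1 : Nat) : Int) from by omega]
      simp only [PySem.List.pyGetD_natCast, PySem.List.pySetD_natCast]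
      obtain ⟨t', ht'⟩ : ∃ t', t = t' + 1 := ⟨t - 1, by omega⟩
      have hu : ufun s t = if s.getD t 0 > s.getD (t - 1) 0 then ufun s (t - 1) + 1 else 1 := by
        rw [ht', show t' + 1 - 1 = t' from by omega]
        simp only [ufun]
      by_cases hgt : s.getD t 0 > s.getD (t - 1) 0
      · rw [if_pos hgt]
        refine ⟨by simp [ihl], ?_⟩
        intro i hi
        by_cases hit : i = t
        · subst hit
          have hilen : i < L.length := by omega
          rw [if_pos (by omega)]
          simp only [List.getD, List.getElem?_set_self, hilen, Option.getD_some]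
          rw [← List.getD, ihg (i - 1) (by omega), if_pos (by omega), hu, if_pos hgt]
        · rw [List.getD, List.getElem?_set_ne (by omega), ← List.getD, ihg i hi]
          by_cases hlt : i < t
          · rw [if_pos hlt, if_pos (by omega)]
          · rw [if_neg hlt, if_neg (by omega)]
      · rw [if_neg hgt]
        refine ⟨ihl, ?_⟩
        intro i hi
        rw [ihg i hi]
        by_cases hit : i = t
        · subst hit
          rw [if_neg (by omega), if_pos (by omega), hu, if_neg hgt]
        · by_cases hlt : i < t
          · rw [if_pos hlt, if_pos (by omega)]
          · rw [if_neg hlt, if_neg (by omega)]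

-- A's backward pass turns them into the rfun values
lemma bwd_inv (s : List Int) : ∀ m, m < s.length → ∀ init : List Int,
    init.length = s.length →
    (∀ i, i < s.length → init.getD i 0 = if m ≤ i then rfun s i else ufun s i) →
    (((PySem.List.pyRange 0 (m : Int) 1).reverse).foldl (stepB s) init).length = s.length ∧
    ∀ i, i < s.length →
      (((PySem.List.pyRange 0 (m : Int) 1).reverse).foldl (stepB s) init).getD i 0 = rfun s i := by
  intro m
  induction m with
  | zero =>
    intro hm init hlen hinit
    rw [show ((0 : Nat) : Int) = 0 from rfl, PySem.List.pyRange_one_eq_nil (by norm_num)]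
    simp only [List.reverse_nil, List.foldl_nil]
    exact ⟨hlen, fun i hi => by rw [hinit i hi, if_pos (Nat.zero_le i)]⟩
  | succ m ih =>
    intro hm init hlen hinit
    rw [show ((m + 1 : Nat) : Int) = (m : Int) + 1 from by push_cast; ring,
      PySem.List.pyRange_one_succ_right (by omega : (0 : Int) ≤ (m : Int)),
      List.reverse_append, List.reverse_singleton, List.singleton_append, List.foldl_cons]
    refine ih (by omega) (stepB s init (m : Int)) ?_ ?_
    · unfold stepB
      split <;> simp [hlen]
    · intro i hi
      unfold stepB
      rw [show (m : Int) + 1 = ((m + 1 : Nat) : Int) from by push_cast; ring]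
      simp only [PySem.List.pyGetD_natCast, PySem.List.pySetD_natCast]
      by_cases hgt : s.getD m 0 > s.getD (m + 1) 0
      · rw [if_pos hgt]
        by_cases him : i = m
        · subst him
          have hilen : i < init.length := by omega
          rw [if_pos (le_refl i)]
          simp only [List.getD, List.getElem?_set_self, hilen, Option.getD_some]
          rw [← List.getD, ← List.getD, hinit i (by omega), if_neg (by omega),
            hinit (i + 1) (by omega), if_pos (by omega)]
          rw [show rfun s i = max (ufun s i) (rfun s (i + 1) + 1) from by
            rw [rfun, dif_pos ⟨by omega, hgt⟩]]
        · rw [List.getD, List.getElem?_set_ne (by omega), ← List.getD, hinit i hi]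
          by_cases hle : m ≤ i
          · rw [if_pos hle, if_pos (by omega)]
          · rw [if_neg hle, if_neg (by omega)]
      · rw [if_neg hgt]
        rw [hinit i hi]
        by_cases him : i = m
        · subst him
          rw [if_neg (by omega), if_pos (le_refl i)]
          rw [rfun, dif_neg (fun h => hgt h.2)]
        · by_cases hle : m ≤ i
          · rw [if_pos (by omega), if_pos hle]
          · rw [if_neg (by omega), if_neg hle]

lemma A_char (s : List Int) (hs : s ≠ []) : min_reward s = F s s.length := by
  have hn : 1 ≤ s.length := List.length_pos_of_ne_nil hs
  obtain ⟨hflen, hfget⟩ := fwd_inv s s.length (le_refl _)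
  have hinit : ∀ i, i < s.length →
      ((PySem.List.pyRange 1 ((s.length : Nat) : Int) 1).foldl (stepF s) (s.map (fun _ => (1 : Int)))).getD i 0
        = if s.length - 1 ≤ i then rfun s i else ufun s i := by
    intro i hi
    rw [hfget i hi, if_pos hi]
    by_cases he : s.length - 1 ≤ i
    · have : i = s.length - 1 := by omega
      subst this
      rw [if_pos he, rfun, dif_neg (by omega)]
    · rw [if_neg he]
  obtain ⟨hblen, hbget⟩ := bwd_inv s (s.length - 1) (by omega) _ hflen hinit
  simp only [min_reward, PySem.List.len_eq]
  rw [show (s.length : Int) - 1 = ((s.length - 1 : Nat) : Int) from by omega]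
  rw [sum_eq_range_getD, hblen]
  unfold F
  refine congrArg List.sum (List.map_congr_left ?_)
  intro i hi
  rw [hbget i (List.mem_range.mp hi), rfun_eq_max]

-- B's loop invariant: after the pair ending at index k the state is
-- (totFun k, u k - 1, dn k, u (peak index) - 1)
lemma B_inv (s : List Int) : ∀ k, k < s.length →
    (PySem.List.pyRange 1 ((k : Int) + 1) 1).foldl (stepAlt s) (1, 0, 0, 0) =
      (totFun s k, ufun s k - 1, (dnfun s k : Int), ufun s (k - dnfun s k) - 1) := by
  intro k
  induction k with
  | zero =>
    intro _
    rw [show ((0 : Nat) : Int) + 1 = 1 from by norm_num, PySem.List.pyRange_one_eq_nil (by norm_num)]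
    simp only [List.foldl_nil]
    norm_num [totFun, F, tri, ufun, dnfun]
  | succ k ih =>
    intro hk
    rw [show ((k + 1 : Nat) : Int) + 1 = ((k : Int) + 1) + 1 from by push_cast; ring,
      PySem.List.pyRange_one_succ_right (by omega), List.foldl_append, List.foldl_cons,
      List.foldl_nil, ih (by omega)]
    unfold stepAlt
    rw [show (k : Int) + 1 - 1 = (k : Int) from by ring,
      show (k : Int) + 1 = ((k + 1 : Nat) : Int) from by push_cast; ring]
    simp only [PySem.List.pyGetD_natCast]
    have hck : dnfun s k ≤ k := dnfun_le s k
    by_cases h1 : s.getD (k + 1) 0 > s.getD k 0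
    · rw [if_pos h1]
      have hu : ufun s (k + 1) = ufun s k + 1 := by simp only [ufun]; rw [if_pos h1]
      have hdn : dnfun s (k + 1) = 0 := by simp only [dnfun]; rw [if_neg (by omega)]
      have hF := F_succ_eq s k (by omega) (dfun_one_of_stop s k (by omega))
      have h0 : totFun s (k + 1) = F s (k + 1) + max (ufun s (k + 1)) ((0 : Int) + 1) + tri 0 := by
        unfold totFun; rw [hdn]; simp only [Nat.sub_zero, Nat.cast_zero]
      have htot : totFun s (k + 1) = totFun s k + (ufun s k + 1) := by
        rw [h0, hF, tri_zero, hu]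
        have := ufun_pos s k
        omega
      rw [htot, hdn]
      simp only [Nat.sub_zero, Nat.cast_zero]
      rw [hu]
      exact congrArg₂ Prod.mk (by ring) (congrArg₂ Prod.mk (by ring)
        (congrArg₂ Prod.mk rfl (by ring)))
    · rw [if_neg h1]
      have hu1 : ufun s (k + 1) = 1 := by simp only [ufun]; rw [if_neg h1]
      by_cases h2 : s.getD (k + 1) 0 < s.getD k 0
      · rw [if_pos h2]
        have hdn : dnfun s (k + 1) = dnfun s k + 1 := by simp only [dnfun]; rw [if_pos (by omega)]
        have e : k + 1 - (dnfun s k + 1) = k - dnfun s k := by omega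
        have htot : totFun s (k + 1) =
            F s (k - dnfun s k) + max (ufun s (k - dnfun s k)) ((dnfun s k : Int) + 2)
              + tri (dnfun s k) + ((dnfun s k : Int) + 1) := by
          unfold totFun
          rw [hdn, e, tri_succ]
          push_cast
          omega
        rw [htot, hdn, e]
        have hupos := ufun_pos s (k - dnfun s k)
        refine congrArg₂ Prod.mk ?_ (congrArg₂ Prod.mk (by rw [hu1]; ring)
          (congrArg₂ Prod.mk (by push_cast; ring) rfl))
        unfold totFun
        split_ifs <;> omega
      · rw [if_neg h2]
        have hdn : dnfun s (k + 1) = 0 := by simp only [dnfun]; rw [if_neg (by omega)]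
        have hF := F_succ_eq s k (by omega) (dfun_one_of_stop s k (by omega))
        have h0 : totFun s (k + 1) = F s (k + 1) + max (ufun s (k + 1)) ((0 : Int) + 1) + tri 0 := by
          unfold totFun; rw [hdn]; simp only [Nat.sub_zero, Nat.cast_zero]
        have htot : totFun s (k + 1) = totFun s k + 1 := by
          rw [h0, hF, tri_zero, hu1]
          norm_num
        rw [htot, hdn]
        simp only [Nat.sub_zero, Nat.cast_zero]
        rw [hu1]
        exact congrArg₂ Prod.mk rfl (congrArg₂ Prod.mk (by ring)
          (congrArg₂ Prod.mk rfl (by ring)))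

lemma B_char (s : List Int) (hs : s ≠ []) : min_reward_alt s = totFun s (s.length - 1) := by
  have hn : 1 ≤ s.length := List.length_pos_of_ne_nil hs
  unfold min_reward_alt
  rw [if_neg hs]
  simp only [PySem.List.len_eq]
  rw [show (s.length : Int) = ((s.length - 1 : Nat) : Int) + 1 from by omega,
    B_inv s (s.length - 1) (by omega)]

-- ===== VERDICT (by name: the statement is the Claim_ definition above) =====
theorem min_reward_spec : Claim_equal_min_reward := by
  intro scores _
  unfold Spec_min_reward
  by_cases hs : scores = []
  · subst hs; decide
  · have hn : 1 ≤ scores.length := List.length_pos_of_ne_nil hs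
    rw [A_char scores hs, B_char scores hs]
    have hstop : dfun scores (scores.length - 1) = 1 :=
      dfun_one_of_stop scores _ (by omega)
    have := F_succ_eq scores (scores.length - 1) (by omega) hstop
    rw [← this]
    congr 1
    omega
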